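-- pv_equiv track=rewrite | github.com/ale-01cu/Smart-Search-Engine | App_Buscador/searcher/results_controller.py | vectorize
-- ===== SOURCE A (Python) =====
-- def vectorize(input_features:dict, vocabulary:list) -> dict:
-- 	output:dict = {}
-- 	for item_id in input_features.keys():
-- 		features = input_features.get(item_id)
-- 		output_vector:list = []
-- 		for word in vocabulary:
-- 			if word in features.keys():
-- 				output_vector.append(int(features.get(word)))
-- 			else:
-- 				output_vector.append(0)
-- 		output[item_id] = output_vector
-- 	return output
-- ===== SOURCE B (Python) =====
-- def vectorize(input_features: dict, vocabulary: list) -> dict: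
--     # Invert the vocabulary once: word -> all of its positions.
--     positions = {}
--     for i, w in enumerate(vocabulary):
--         positions.setdefault(w, []).append(i)
--     output = {}
--     for item_id, features in input_features.items():
--         vec = [0] * len(vocabulary)
--         for word, value in features.items():
--             for i in positions.get(word, []):
--                 vec[i] = int(value)
--         output[item_id] = vec
--     return output
-- ===== Notes on version B (the rewrite author's own statement) =====
-- stated objective: faster
-- what changed: Instead of rescanning the whole vocabulary with a membership test per item, B inverts the vocabulary once into a word->positions index and, per item, fills a preallocated zero vector by writing int(value) at the positions of each present feature word.
import Mathlib
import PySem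

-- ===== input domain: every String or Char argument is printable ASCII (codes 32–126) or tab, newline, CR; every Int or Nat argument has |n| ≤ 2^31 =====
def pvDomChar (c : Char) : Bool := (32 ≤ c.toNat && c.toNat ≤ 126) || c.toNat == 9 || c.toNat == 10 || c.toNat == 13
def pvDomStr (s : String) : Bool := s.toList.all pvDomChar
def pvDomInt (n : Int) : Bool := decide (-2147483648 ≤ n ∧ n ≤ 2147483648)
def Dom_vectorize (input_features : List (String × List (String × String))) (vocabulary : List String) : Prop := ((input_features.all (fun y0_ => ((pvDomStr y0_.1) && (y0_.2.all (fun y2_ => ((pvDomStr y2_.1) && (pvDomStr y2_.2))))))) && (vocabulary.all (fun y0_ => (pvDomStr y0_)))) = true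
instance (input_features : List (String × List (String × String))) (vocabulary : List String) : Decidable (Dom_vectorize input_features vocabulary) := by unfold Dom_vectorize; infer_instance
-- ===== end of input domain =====

-- B inverts the vocabulary once into a word → positions index and fills a zero vector from each
-- item's own features, instead of rescanning the whole vocabulary per item.

-- ===== PORT A =====
-- int(v) is ported as (PySem.Int.ofStr? v).getD 0; the `none` (ValueError) case is excluded by Pre_.
def vectorize (input_features : List (String × List (String × String))) (vocabulary : List String) : List (String × List Int) :=
  let d : PySem.Dict String (List (String × String)) := PySem.Dict.mk input_features
  (d.keys.foldl (fun output item_id =>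
    let features : PySem.Dict String String := PySem.Dict.mk ((d.get? item_id).getD [])
    let output_vector : List Int := vocabulary.foldl (fun acc word =>
      if features.contains word then
        acc ++ [(PySem.Int.ofStr? ((features.get? word).getD "")).getD 0]
      else
        acc ++ [0]) []
    output.insert item_id output_vector) (PySem.Dict.empty : PySem.Dict String (List Int))).items

-- ===== PORT B =====
-- `positions.setdefault(w, []).append(i)` is ported as `modify w [] (· ++ [i])` (the same dict
-- operation: d[w] = d.get(w, []) + [i]); `vec[i] = int(value)` as pySetD (total form; the
-- indices come from enumerate, hence are in range).
def vectorize_alt (input_features : List (String × List (String × String))) (vocabulary : List String) : List (String × List Int) :=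
  let positions : PySem.Dict String (List Int) :=
    (PySem.List.enumerate vocabulary).foldl (fun dd p => dd.modify p.2 [] (fun l => l ++ [p.1])) PySem.Dict.empty
  (input_features.foldl (fun output p =>
    let vec : List Int := p.2.foldl (fun vec q =>
      ((positions.get? q.1).getD []).foldl (fun v i => PySem.List.pySetD v i ((PySem.Int.ofStr? q.2).getD 0)) vec)
      (List.replicate vocabulary.length (0 : Int))
    output.insert p.1 vec) (PySem.Dict.empty : PySem.Dict String (List Int))).items

-- ===== PRECONDITION & SPEC =====
-- Pre_ excludes (a) association lists with duplicate item ids or duplicate feature words — no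
-- Python dict argument can produce these, and on the list encoding first-match vs last-write
-- order is accidental — and (b) inputs where an in-vocabulary feature value is not
-- int-parseable, on which A raises ValueError.
def Pre_vectorize (input_features : List (String × List (String × String))) (vocabulary : List String) : Prop :=
  (input_features.map (·.1)).Nodup ∧
  ∀ p ∈ input_features, (p.2.map (·.1)).Nodup ∧
    ∀ q ∈ p.2, q.1 ∈ vocabulary → (PySem.Int.ofStr? q.2).isSome = true
instance (input_features : List (String × List (String × String))) (vocabulary : List String) : Decidable (Pre_vectorize input_features vocabulary) := by unfold Pre_vectorize; infer_instance

def pvWitness_vectorize : (List (String × List (String × String))) × List String :=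
  ([("a", [("x", "1"), ("z", "oops")])], ["x", "y"])

def Spec_vectorize (input_features : List (String × List (String × String))) (vocabulary : List String) (out : List (String × List Int)) : Prop := out = vectorize_alt input_features vocabulary
instance (input_features : List (String × List (String × String))) (vocabulary : List String) (out : List (String × List Int)) : Decidable (Spec_vectorize input_features vocabulary out) := by unfold Spec_vectorize; infer_instance

-- ===== CLAIM (what is proved, stated in full; the proofs are below) =====
def Claim_equal_vectorize : Prop := ∀ (input_features : List (String × List (String × String))) (vocabulary : List String), Dom_vectorize input_features vocabulary → Pre_vectorize input_features vocabulary → Spec_vectorize input_features vocabulary (vectorize input_features vocabulary)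

-- ===== LEMMAS AND PROOFS =====

-- the per-word value both programs compute from a feature table
def wordVal (fd : PySem.Dict String String) (w : String) : Int :=
  match fd.get? w with
  | some val => (PySem.Int.ofStr? val).getD 0
  | none => 0

-- B's positions dict characterised: the bucket of c is the filtered enumeration
lemma positions_getD (vocabulary : List String) (c : String) :
    ((PySem.List.enumerate vocabulary).foldl (fun dd p => dd.modify p.2 [] (fun l => l ++ [p.1]))
      (PySem.Dict.empty : PySem.Dict String (List Int))).getD c []
    = ((PySem.List.enumerate vocabulary).filter (fun p => p.2 == c)).map (·.1) := by
  have h : (PySem.List.enumerate vocabulary).foldl (fun dd p => dd.modify p.2 [] (fun l => l ++ [p.1]))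
      (PySem.Dict.empty : PySem.Dict String (List Int))
      = ((PySem.List.enumerate vocabulary).map Prod.swap).foldl
          (fun dd p => dd.modify p.1 [] (fun l => l ++ [p.2])) PySem.Dict.empty := by
    rw [List.foldl_map]; rfl
  rw [h, PySem.Dict.getD_foldl_modify_append]
  simp [List.filter_map, Function.comp_def, List.map_map]

lemma mem_positions (vocabulary : List String) (c : String) (j : Int) :
    j ∈ ((PySem.List.enumerate vocabulary).filter (fun p => p.2 == c)).map (·.1)
    ↔ ∃ k : Nat, k < vocabulary.length ∧ j = (k : Int) ∧ vocabulary[k]? = some c := by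
  simp only [List.mem_map, List.mem_filter, PySem.List.mem_enumerate_iff]
  constructor
  · rintro ⟨p, ⟨⟨k, hk, rfl⟩, hc⟩, rfl⟩
    exact ⟨k, hk, by simp, by simpa [List.getElem?_eq_getElem hk] using (beq_iff_eq.mp hc)⟩
  · rintro ⟨k, hk, rfl, hv⟩
    refine ⟨(0 + (k:Int), vocabulary[k]), ⟨⟨k, hk, rfl⟩, ?_⟩, by simp⟩
    simp [List.getElem?_eq_getElem hk] at hv
    simp [hv]

lemma foldl_pySetD_getElem? (ps : List Int) (x : Int) (v : List Int) (j : Nat)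
    (h : ∀ i ∈ ps, 0 ≤ i) :
    (ps.foldl (fun v i => PySem.List.pySetD v i x) v)[j]?
      = if ((j : Int) ∈ ps ∧ j < v.length) then some x else v[j]? := by
  induction ps generalizing v with
  | nil => simp
  | cons i ps ih =>
    have h0 : (0:Int) ≤ i := h i (by simp)
    simp only [List.foldl_cons]
    rw [ih _ (fun i hi => h i (by simp [hi]))]
    rw [PySem.List.pySetD_of_nonneg v x h0, List.length_set, List.getElem?_set]
    by_cases hji : (j:Int) = i
    · have ht : i.toNat = j := by omega
      simp only [ht, List.mem_cons, hji, true_or]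
      split_ifs <;> simp_all
    · have ht : i.toNat ≠ j := by omega
      simp [ht, hji]

-- one feature write pass turns voc.map m into voc.map (update at c)
lemma write_pass (vocabulary : List String) (m : String → Int) (c : String) (x : Int) :
    ((((PySem.List.enumerate vocabulary).filter (fun p => p.2 == c)).map (·.1)).foldl
        (fun v i => PySem.List.pySetD v i x) (vocabulary.map m))
    = vocabulary.map (fun w => if w = c then x else m w) := by
  apply List.ext_getElem?
  intro j
  rw [foldl_pySetD_getElem? _ x _ j
    (fun i hi => by obtain ⟨k, _, rfl, _⟩ := (mem_positions vocabulary c i).mp hi; positivity)]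
  simp only [mem_positions, List.length_map]
  by_cases hj : j < vocabulary.length
  · have hv : vocabulary[j]? = some vocabulary[j] := List.getElem?_eq_getElem hj
    by_cases hc : vocabulary[j] = c
    · rw [if_pos ⟨⟨j, hj, rfl, by rw [hv, hc]⟩, by simpa using hj⟩]
      simp [List.getElem?_map, hv, hc]
    · rw [if_neg]
      · simp [List.getElem?_map, hv, hc]
      · rintro ⟨⟨k, hk, hkj, hvk⟩, -⟩
        have : k = j := by omega
        subst this
        simp [hv] at hvk; exact hc hvk
  · have hv : vocabulary[j]? = none := List.getElem?_eq_none (by omega)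
    rw [if_neg (by rintro ⟨-, hlen⟩; omega)]
    simp [List.getElem?_map, hv]

-- B's per-item fold computes the vocabulary map of the looked-up values
lemma item_fold (vocabulary : List String) (fs : List (String × String)) (m : String → Int)
    (hnd : (fs.map (·.1)).Nodup) :
    fs.foldl (fun vec q =>
        (((((PySem.List.enumerate vocabulary).foldl
              (fun dd p => dd.modify p.2 [] (fun l => l ++ [p.1]))
              (PySem.Dict.empty : PySem.Dict String (List Int))).get? q.1).getD []).foldl
          (fun v i => PySem.List.pySetD v i ((PySem.Int.ofStr? q.2).getD 0)) vec))
      (vocabulary.map m)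
    = vocabulary.map (fun w =>
        match (PySem.Dict.mk fs).get? w with
        | some val => (PySem.Int.ofStr? val).getD 0
        | none => m w) := by
  induction fs generalizing m with
  | nil =>
    simp only [List.foldl_nil]
    rfl
  | cons q fs ih =>
    simp only [List.foldl_cons]
    rw [← PySem.Dict.getD_eq_get?_getD, positions_getD, write_pass]
    have hnd' : (fs.map (·.1)).Nodup := (List.nodup_cons.mp (by simpa using hnd)).2
    rw [ih _ hnd']
    congr 1
    funext w
    have hq : q.1 ∉ fs.map (·.1) := (List.nodup_cons.mp (by simpa using hnd)).1
    have hnone : (PySem.Dict.mk fs).get? q.1 = none := by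
      rw [PySem.Dict.get?_eq_none_iff_not_mem_keys]
      simpa [PySem.Dict.keys_mk] using hq
    by_cases hw : w = q.1
    · rw [PySem.Dict.get?_mk_cons]
      simp [hw, hnone]
    · rw [PySem.Dict.get?_mk_cons]
      have hne : (q.1 == w) = false := by simp [Ne.symm hw]
      simp [hne, hw]

-- A's per-item loop computes the same map
lemma item_loop_A (vocabulary : List String) (fs : List (String × String)) :
    vocabulary.foldl (fun acc word =>
      if (PySem.Dict.mk fs).contains word then
        acc ++ [(PySem.Int.ofStr? (((PySem.Dict.mk fs).get? word).getD "")).getD 0]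
      else acc ++ [0]) []
    = vocabulary.map (wordVal (PySem.Dict.mk fs)) := by
  have h : ∀ (acc : List Int) (word : String),
      (if (PySem.Dict.mk fs).contains word then
        acc ++ [(PySem.Int.ofStr? (((PySem.Dict.mk fs).get? word).getD "")).getD 0]
      else acc ++ [0]) = acc ++ [wordVal (PySem.Dict.mk fs) word] := by
    intro acc word
    rw [PySem.Dict.contains_eq_isSome_get?]
    cases hg : (PySem.Dict.mk fs).get? word <;> simp [wordVal, hg]
  calc _ = vocabulary.foldl (fun acc word => acc ++ [wordVal (PySem.Dict.mk fs) word]) [] :=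
        PySem.List.foldl_congr_mem _ _ _ _ (fun acc x _ => h acc x)
    _ = _ := by rw [PySem.List.foldl_append_singleton_eq_map]; simp

-- ===== VERDICT (by name: the statement is the Claim_ definition above) =====
theorem vectorize_spec : Claim_equal_vectorize := by
  intro input_features vocabulary _ hpre
  obtain ⟨h1, h2⟩ := hpre
  unfold Spec_vectorize vectorize vectorize_alt
  dsimp only
  rw [PySem.Dict.items_foldl_insert_fresh (k := fun a => a)
        (v := fun item_id => vocabulary.foldl (fun acc word =>
          if (PySem.Dict.mk (((PySem.Dict.mk input_features).get? item_id).getD [])).contains word then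
            acc ++ [(PySem.Int.ofStr? (((PySem.Dict.mk (((PySem.Dict.mk input_features).get? item_id).getD [])).get? word).getD "")).getD 0]
          else acc ++ [0]) [])
        _ _ (fun a _ => PySem.Dict.contains_empty a)
        (by simpa [PySem.Dict.keys_mk] using h1)]
  have hB := PySem.Dict.items_foldl_insert_fresh (l := input_features) (k := fun p => p.1)
        (v := fun p => p.2.foldl (fun vec q =>
          (((((PySem.List.enumerate vocabulary).foldl
                (fun dd p => dd.modify p.2 [] (fun l => l ++ [p.1]))
                (PySem.Dict.empty : PySem.Dict String (List Int))).get? q.1).getD []).foldl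
            (fun v i => PySem.List.pySetD v i ((PySem.Int.ofStr? q.2).getD 0)) vec))
          (List.replicate vocabulary.length (0 : Int)))
        (d := PySem.Dict.empty)
        (fun a _ => PySem.Dict.contains_empty a.1) h1
  rw [hB]
  simp only [show (PySem.Dict.empty : PySem.Dict String (List Int)).items = [] from rfl,
    List.nil_append, PySem.Dict.keys_mk, List.map_map]
  apply List.map_congr_left
  intro p hp
  have hget : (PySem.Dict.mk input_features).get? p.1 = some p.2 :=
    PySem.Dict.get?_of_mem_items _ hp (by simpa [PySem.Dict.keys_mk] using h1)
  simp only [Function.comp_def, hget, Option.getD_some]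
  rw [item_loop_A]
  have hrep : List.replicate vocabulary.length (0 : Int) = vocabulary.map (fun _ => 0) := by
    simp
  rw [hrep, item_fold vocabulary p.2 (fun _ => 0) (h2 p hp).1]
  rfl
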